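-- pv_equiv track=rewrite | github.com/yxwu21/PBGNN | src/utils.py | group_pkl_by_mol
-- ===== SOURCE A (Python) =====
-- def group_pkl_by_mol(pkl_list: list, pattern: str = "_raw.pkl.gz"):
--     mol_dict = {}
--     for pkl in pkl_list:
--         mol_id = pkl.split("/")[-1].replace(pattern, "")
--         if mol_id not in mol_dict:
--             mol_dict[mol_id] = [pkl]
--         else:
--             mol_dict[mol_id].append(pkl)
--     return mol_dict
-- ===== SOURCE B (Python) =====
-- def group_pkl_by_mol(pkl_list: list, pattern: str = "_raw.pkl.gz"):
--     keys = [pkl.split("/")[-1].replace(pattern, "") for pkl in pkl_list]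
--     return {k: [pkl for pkl, kk in zip(pkl_list, keys) if kk == k]
--             for k in dict.fromkeys(keys)}
-- ===== Notes on version B (the rewrite author's own statement) =====
-- stated objective: alternative
-- what changed: Replaces the running dict accumulator (membership test + append per element) by a two-phase comprehension: compute every mol_id once, dedupe them in first-occurrence order with dict.fromkeys, then build each group by one filtering pass over the zipped (path, key) list.
import Mathlib
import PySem

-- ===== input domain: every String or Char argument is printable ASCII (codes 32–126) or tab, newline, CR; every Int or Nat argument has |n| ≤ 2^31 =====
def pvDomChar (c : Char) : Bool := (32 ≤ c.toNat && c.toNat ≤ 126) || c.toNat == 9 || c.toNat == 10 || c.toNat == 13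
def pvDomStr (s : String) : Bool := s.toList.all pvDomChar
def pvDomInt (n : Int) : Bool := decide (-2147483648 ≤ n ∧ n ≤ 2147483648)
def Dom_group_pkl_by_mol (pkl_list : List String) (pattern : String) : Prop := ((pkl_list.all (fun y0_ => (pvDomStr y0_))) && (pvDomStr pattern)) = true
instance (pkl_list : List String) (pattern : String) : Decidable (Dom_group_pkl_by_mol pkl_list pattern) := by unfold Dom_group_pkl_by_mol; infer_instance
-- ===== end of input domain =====

-- B replaces A's running dict accumulator by a two-phase strategy (compute all mol_ids,
-- dedupe in first-occurrence order, then one filtering pass per distinct mol_id); same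
-- return value, stated as an alternative decomposition (not faster).


-- shared by both ports: mol_id = pkl.split("/")[-1].replace(pattern, "")
-- (split("/") always returns a nonempty list, so the [-1] index never raises; .getD "" is unreachable)
def pvMolId (pkl pattern : String) : String :=
  PySem.Str.replace ((PySem.List.pyGet? ((PySem.Str.split? pkl "/").getD []) (-1)).getD "") pattern ""

-- ===== PORT A =====
def group_pkl_by_mol (pkl_list : List String) (pattern : String) : List (String × List String) :=
  (pkl_list.foldl (fun mol_dict pkl =>
      let mol_id := pvMolId pkl pattern
      if mol_dict.contains mol_id = false then
        mol_dict.insert mol_id [pkl]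
      else
        mol_dict.insert mol_id (mol_dict.getD mol_id [] ++ [pkl]))
    (PySem.Dict.empty : PySem.Dict String (List String))).items

-- ===== PORT B =====
-- keys = [mol_id of each pkl]; the dict comprehension runs over the distinct keys in
-- first-occurrence order (dict.fromkeys = PySem.List.dedup), so its items are exactly this map.
def group_pkl_by_mol_alt (pkl_list : List String) (pattern : String) : List (String × List String) :=
  let keys := pkl_list.map (fun pkl => pvMolId pkl pattern)
  (PySem.List.dedup keys).map (fun k =>
    (k, (pkl_list.zip keys).filterMap (fun pk => if pk.2 = k then some pk.1 else none)))

-- ===== PRECONDITION & SPEC =====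
def Spec_group_pkl_by_mol (pkl_list : List String) (pattern : String) (out : List (String × List String)) : Prop := out = group_pkl_by_mol_alt pkl_list pattern
instance (pkl_list : List String) (pattern : String) (out : List (String × List String)) : Decidable (Spec_group_pkl_by_mol pkl_list pattern out) := by unfold Spec_group_pkl_by_mol; infer_instance

-- ===== CLAIM (what is proved, stated in full; the proofs are below) =====
def Claim_equal_group_pkl_by_mol : Prop := ∀ (pkl_list : List String) (pattern : String), Dom_group_pkl_by_mol pkl_list pattern → Spec_group_pkl_by_mol pkl_list pattern (group_pkl_by_mol pkl_list pattern)

-- ===== LEMMAS AND PROOFS =====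

-- one step of A's loop, under the invariant that the dict's items are B's groups so far

theorem step_items (key : String → String) (x : String) (xs : List String)
    (d : PySem.Dict String (List String))
    (hitems : d.items = (PySem.List.dedup (xs.map key)).map (fun k =>
        (k, xs.filter (fun p => key p = k)))) :
    ((if d.contains (key x) = false then d.insert (key x) [x]
      else d.insert (key x) (d.getD (key x) [] ++ [x])).items)
    = (PySem.List.dedup ((xs ++ [x]).map key)).map (fun k =>
        (k, (xs ++ [x]).filter (fun p => key p = k))) := by
  have hkeys : d.keys = PySem.List.dedup (xs.map key) := by
    show d.items.map Prod.fst = _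
    rw [hitems, List.map_map]; simp [Function.comp_def]
  have hnd : d.keys.Nodup := by
    rw [hkeys]; simp only [PySem.List.dedup_eq_ofList]; exact PySem.Set.nodup_ofList _
  have hded : PySem.List.dedup ((xs ++ [x]).map key)
      = if key x ∈ PySem.List.dedup (xs.map key) then PySem.List.dedup (xs.map key)
        else PySem.List.dedup (xs.map key) ++ [key x] := by
    simp only [List.map_append, List.map_cons, List.map_nil, PySem.List.dedup_eq_ofList]
    rw [PySem.Set.ofList_append_singleton, PySem.Set.add_eq_ite]
  have hcont : d.contains (key x) = decide (key x ∈ PySem.List.dedup (xs.map key)) := by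
    rw [PySem.Dict.contains_eq_decide_mem_keys, hkeys]
  by_cases hmem : key x ∈ PySem.List.dedup (xs.map key)
  · -- existing key
    have hc : d.contains (key x) = true := by rw [hcont]; exact decide_eq_true hmem
    rw [if_neg (by simp [hc])]
    have hin : (key x, xs.filter (fun p => key p = key x)) ∈ d.items := by
      rw [hitems]; exact List.mem_map.2 ⟨key x, hmem, rfl⟩
    have hgd : d.getD (key x) [] = xs.filter (fun p => key p = key x) :=
      PySem.Dict.getD_of_mem_items d hin hnd []
    rw [PySem.Dict.items_insert_of_contains d _ hc, hitems, hded, if_pos hmem, hgd,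
        List.map_map]
    apply List.map_congr_left
    intro k hk
    simp only [Function.comp]
    by_cases hkx : k = key x
    · subst hkx
      simp [List.filter_append]
    · have hb : (k == key x) = false := by simp [hkx]
      have hdk : decide (key x = k) = false := decide_eq_false (fun h => hkx h.symm)
      have hf : [x].filter (fun p => decide (key p = k)) = [] := by
        simp [List.filter, hdk]
      simp only [hb, Bool.false_eq_true, if_false, List.filter_append, hf, List.append_nil]
  · -- fresh key
    have hc : d.contains (key x) = false := by rw [hcont]; exact decide_eq_false hmem
    rw [if_pos hc]
    rw [PySem.Dict.items_insert_of_not_contains d _ hc, hitems, hded, if_neg hmem,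
        List.map_append]
    congr 1
    · apply List.map_congr_left
      intro k hk
      have hkx : k ≠ key x := fun h => hmem (h ▸ hk)
      have hdk : decide (key x = k) = false := decide_eq_false (fun h => hkx h.symm)
      have hf : [x].filter (fun p => decide (key p = k)) = [] := by
        simp [List.filter, hdk]
      simp only [List.filter_append, hf, List.append_nil]
    · have hxs : xs.filter (fun p => decide (key p = key x)) = [] := by
        rw [List.filter_eq_nil_iff]
        intro p hp h
        simp only [decide_eq_true_eq] at h
        exact hmem ((PySem.List.mem_dedup _ _).2 (List.mem_map.2 ⟨p, hp, h⟩))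
      simp [List.filter_append, hxs, List.filter]


-- B's zip/filterMap pass is the plain filter by key
theorem zip_filterMap_eq_filter (key : String → String) (k : String) :
    ∀ l : List String,
      (l.zip (l.map key)).filterMap (fun pk => if pk.2 = k then some pk.1 else none)
        = l.filter (fun p => key p = k) := by
  intro l
  induction l with
  | nil => rfl
  | cons x xs ih =>
      simp only [List.map_cons, List.zip_cons_cons, List.filterMap_cons, List.filter_cons]
      by_cases h : key x = k <;> simp [h, ih]

-- the loop invariant: after processing l, the dict's items are exactly B's groups for l
theorem foldl_items_eq (pattern : String) :
    ∀ l : List String,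
      ((l.foldl (fun mol_dict pkl =>
          let mol_id := pvMolId pkl pattern
          if mol_dict.contains mol_id = false then
            mol_dict.insert mol_id [pkl]
          else
            mol_dict.insert mol_id (mol_dict.getD mol_id [] ++ [pkl]))
        (PySem.Dict.empty : PySem.Dict String (List String))).items)
      = (PySem.List.dedup (l.map (fun pkl => pvMolId pkl pattern))).map (fun k =>
          (k, l.filter (fun p => pvMolId p pattern = k))) := by
  intro l
  induction l using List.reverseRecOn with
  | nil => rfl
  | append_singleton xs x ih =>
      rw [List.foldl_append, List.foldl_cons, List.foldl_nil]
      exact step_items (fun pkl => pvMolId pkl pattern) x xs _ ih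

theorem group_pkl_by_mol_spec : Claim_equal_group_pkl_by_mol := by
  intro pkl_list pattern _
  unfold Spec_group_pkl_by_mol group_pkl_by_mol group_pkl_by_mol_alt
  rw [foldl_items_eq]
  simp [zip_filterMap_eq_filter]
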